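-- pv_equiv track=rewrite | github.com/maciejjan/morle | src/incubator/stemming.py | stem_lexeme_lsv
-- ===== SOURCE A (Python) =====
-- def stem_lexeme_lsv(lexeme):
-- 	segmentations = []
-- 	for i in range(len(lexeme)):
-- 		lexeme[i] = '#' + lexeme[i] + '#'
-- 	for word in lexeme:
-- #		print '\n' + word
-- 		lsv, lpv = [], []
-- 		l = len(word)
-- 		for i in range(l):
-- #			print set([w[len(w)-i-1] for w in lexeme \
-- #				if len(w) > i and w.endswith(word[len(word)-i:])])
-- 			lsv.append(len(set([w[i] for w in lexeme \
-- 				if len(w) > i and w.startswith(word[:i])])))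
-- 			lpv.append(len(set([w[len(w)-i-1] for w in lexeme \
-- 				if len(w) > i and w.endswith(word[len(word)-i:])])))
-- 		seg = ''
-- 		for i in range(1, l-1):
-- 			if i > 1 and lsv[i] > lsv[i-1] and lsv[i] >= lsv[i+1]:
-- 				seg += '|'
-- 			seg += word[i]
-- 			if i < l-2 and lpv[l-i-1] >= lpv[l-i-2] and lpv[l-i-1] > lpv[l-i]:
-- 				seg += '|'
-- 		seg = seg.replace('||', '|')
-- 		segmentations.append(seg)
-- 	return segmentations
-- ===== SOURCE B (Python) =====
-- def _succ_trie(words):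
--     succ = {}
--     for w in words:
--         for i in range(len(w)):
--             succ.setdefault(w[:i], set()).add(w[i])
--     return succ
--
-- def _pred_trie(words):
--     pred = {}
--     for w in words:
--         n = len(w)
--         for i in range(n):
--             pred.setdefault(w[n-i:], set()).add(w[n-i-1])
--     return pred
--
-- def _segment(word, lsv, lpv):
--     l = len(word)
--     seg = ''
--     for i in range(1, l-1):
--         if i > 1 and lsv[i] > lsv[i-1] and lsv[i] >= lsv[i+1]:
--             seg += '|'
--         seg += word[i]
--         if i < l-2 and lpv[l-i-1] >= lpv[l-i-2] and lpv[l-i-1] > lpv[l-i]: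
--             seg += '|'
--     return seg.replace('||', '|')
--
-- def stem_lexeme_lsv(lexeme):
--     for i in range(len(lexeme)):
--         lexeme[i] = '#' + lexeme[i] + '#'
--     succ = _succ_trie(lexeme)
--     pred = _pred_trie(lexeme)
--     segmentations = []
--     for word in lexeme:
--         l = len(word)
--         lsv = [len(succ[word[:i]]) for i in range(l)]
--         lpv = [len(pred[word[l-i:]]) for i in range(l)]
--         segmentations.append(_segment(word, lsv, lpv))
--     return segmentations
-- ===== Notes on version B (the rewrite author's own statement) =====
-- stated objective: faster
-- what changed: Instead of scanning the whole lexeme and building a fresh set for every word and every position, B builds one prefix->successor-chars dictionary and one suffix->predecessor-chars dictionary in a single pass over the lexeme and reads each variety count as the size of one stored set.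
import Mathlib
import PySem

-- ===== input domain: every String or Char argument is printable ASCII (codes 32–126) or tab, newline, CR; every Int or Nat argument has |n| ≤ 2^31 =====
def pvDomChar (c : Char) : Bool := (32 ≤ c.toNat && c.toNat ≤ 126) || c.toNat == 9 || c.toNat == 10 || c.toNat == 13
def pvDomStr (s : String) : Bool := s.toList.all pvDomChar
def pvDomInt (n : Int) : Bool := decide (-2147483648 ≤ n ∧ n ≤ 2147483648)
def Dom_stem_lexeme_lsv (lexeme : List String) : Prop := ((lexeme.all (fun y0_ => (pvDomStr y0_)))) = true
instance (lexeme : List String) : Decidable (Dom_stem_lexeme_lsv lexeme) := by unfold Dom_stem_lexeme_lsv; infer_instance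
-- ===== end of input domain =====

-- B replaces A's per-word-per-position scans over the whole lexeme by two dictionaries
-- (prefix -> successor chars, reversed suffix -> predecessor chars) built in one pass each
-- (objective: faster). NOTE: the Python A mutates its argument in place
-- (lexeme[i] = '#'+lexeme[i]+'#'); B performs the same mutation; the equivalence proved
-- here is about the RETURN value.

-- ===== PORT A =====
-- 'for i in range(len(lexeme)): lexeme[i] = '#' + lexeme[i] + '#''  (elementwise update = map);
-- the same line opens Source B, so both ports share this helper
def pvDecorate (lexeme : List String) : List (List Char) :=
  lexeme.map (fun s => '#' :: s.toList ++ ['#'])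

-- the seg-building loop of A ('seg = ''; for i in range(1, l-1): ...; seg.replace('||','|')');
-- Source B's _segment is the identical code, so port B reuses this helper
def pvSegLoop (w : List Char) (lsv lpv : List Nat) : List Char :=
  let l : Int := w.length
  let seg : List Char := (PySem.List.pyRange 1 (l - 1) 1).foldl (fun seg i =>
    let seg := if 1 < i ∧ PySem.List.pyGetD lsv (i - 1) 0 < PySem.List.pyGetD lsv i 0
                  ∧ PySem.List.pyGetD lsv (i + 1) 0 ≤ PySem.List.pyGetD lsv i 0
               then seg ++ ['|'] else seg
    let seg := seg ++ [PySem.List.pyGetD w i ' ']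
    if i < l - 2 ∧ PySem.List.pyGetD lpv (l - i - 2) 0 ≤ PySem.List.pyGetD lpv (l - i - 1) 0
        ∧ PySem.List.pyGetD lpv (l - i) 0 < PySem.List.pyGetD lpv (l - i - 1) 0
    then seg ++ ['|'] else seg) []
  PySem.Chars.replace seg ['|', '|'] ['|']

-- 'len(set([w[i] for w in lexeme if len(w) > i and w.startswith(word[:i])]))'
-- (v.getD i ' ' is v[i]; the filter guarantees i < v.length, so the default is never taken)
def pvLsvEntryA (words : List (List Char)) (w : List Char) (i : Nat) : Nat :=
  (PySem.Set.ofList ((words.filter (fun v =>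
      decide (i < v.length) && PySem.Chars.startswith v (PySem.List.slice w none (some (i : Int))))).map
      (fun v => v.getD i ' '))).length

-- 'len(set([w[len(w)-i-1] for w in lexeme if len(w) > i and w.endswith(word[len(word)-i:])]))'
def pvLpvEntryA (words : List (List Char)) (w : List Char) (i : Nat) : Nat :=
  (PySem.Set.ofList ((words.filter (fun v =>
      decide (i < v.length) && PySem.Chars.endswith v (PySem.List.slice w (some ((w.length : Int) - (i : Int))) none))).map
      (fun v => v.getD (v.length - i - 1) ' '))).length

-- the body of A's 'for word in lexeme' loop: build lsv, lpv (one loop, two appends), then seg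
def pvWordA (words : List (List Char)) (w : List Char) : String :=
  let lp := (List.range w.length).foldl (fun (p : List Nat × List Nat) i =>
      (p.1 ++ [pvLsvEntryA words w i], p.2 ++ [pvLpvEntryA words w i])) ([], [])
  String.ofList (pvSegLoop w lp.1 lp.2)

def stem_lexeme_lsv (lexeme : List String) : List String :=
  let words := pvDecorate lexeme
  words.foldl (fun segs w => segs ++ [pvWordA words w]) []

-- ===== PORT B =====
-- Source B _succ_trie: 'succ.setdefault(w[:i], set()).add(w[i])'  (setdefault+add = modify with default ∅)
def pvSuccTrie (words : List (List Char)) : PySem.Dict (List Char) (PySem.Set Char) :=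
  words.foldl (fun d w =>
    (List.range w.length).foldl (fun d (i : Nat) =>
      d.modify (PySem.List.slice w none (some (i : Int))) []
        (fun s => PySem.Set.add s (w.getD i ' '))) d)
    PySem.Dict.empty

-- Source B _pred_trie: 'pred.setdefault(w[n-i:], set()).add(w[n-i-1])'
def pvPredTrie (words : List (List Char)) : PySem.Dict (List Char) (PySem.Set Char) :=
  words.foldl (fun d w =>
    (List.range w.length).foldl (fun d (i : Nat) =>
      d.modify (PySem.List.slice w (some ((w.length : Int) - (i : Int))) none) []
        (fun s => PySem.Set.add s (w.getD (w.length - i - 1) ' '))) d)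
    PySem.Dict.empty

-- 'len(succ[word[:i]])' — the key is always present (word itself contributes), so the [] default is never taken
def pvLsvEntryB (succ : PySem.Dict (List Char) (PySem.Set Char)) (w : List Char) (i : Nat) : Nat :=
  (succ.getD (PySem.List.slice w none (some (i : Int))) []).length

def pvLpvEntryB (pred : PySem.Dict (List Char) (PySem.Set Char)) (w : List Char) (i : Nat) : Nat :=
  (pred.getD (PySem.List.slice w (some ((w.length : Int) - (i : Int))) none) []).length

-- body of Source B's 'for word in lexeme' loop: two comprehensions of dict lookups, then _segment
def pvWordB (succ pred : PySem.Dict (List Char) (PySem.Set Char)) (w : List Char) : String :=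
  let lsv := (List.range w.length).map (pvLsvEntryB succ w)
  let lpv := (List.range w.length).map (pvLpvEntryB pred w)
  String.ofList (pvSegLoop w lsv lpv)

def stem_lexeme_lsv_alt (lexeme : List String) : List String :=
  let words := pvDecorate lexeme
  let succ := pvSuccTrie words
  let pred := pvPredTrie words
  words.foldl (fun segs w => segs ++ [pvWordB succ pred w]) []

-- ===== PRECONDITION & SPEC =====
def Spec_stem_lexeme_lsv (lexeme : List String) (out : List String) : Prop := out = stem_lexeme_lsv_alt lexeme
instance (lexeme : List String) (out : List String) : Decidable (Spec_stem_lexeme_lsv lexeme out) := by unfold Spec_stem_lexeme_lsv; infer_instance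

-- ===== CLAIM (what is proved, stated in full; the proofs are below) =====
def Claim_equal_stem_lexeme_lsv : Prop := ∀ (lexeme : List String), Dom_stem_lexeme_lsv lexeme → Spec_stem_lexeme_lsv lexeme (stem_lexeme_lsv lexeme)

-- ===== LEMMAS AND PROOFS =====

-- membership in a value of a 'setdefault(key(x), set()).add(val(x))' fold
lemma mem_getD_foldl_modify_add {β : Type} (l : List β) (kf : β → List Char) (vf : β → Char)
    (d : PySem.Dict (List Char) (PySem.Set Char)) (p : List Char) (c : Char) :
    (c ∈ (l.foldl (fun d x => d.modify (kf x) [] (fun s => PySem.Set.add s (vf x))) d).getD p []) ↔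
      c ∈ d.getD p [] ∨ ∃ x ∈ l, kf x = p ∧ vf x = c := by
  induction l generalizing d with
  | nil => simp
  | cons a t ih =>
    rw [List.foldl_cons, ih, PySem.Dict.getD_modify]
    split_ifs with h
    · subst h
      constructor
      · rintro (hmem | ⟨x, hx, hk, hv⟩)
        · rcases (PySem.Set.mem_add _ _ _).mp hmem with hc | hc
          · exact Or.inl hc
          · exact Or.inr ⟨a, by simp, rfl, hc.symm⟩
        · exact Or.inr ⟨x, List.mem_cons_of_mem _ hx, hk, hv⟩
      · rintro (hc | ⟨x, hx, hk, hv⟩)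
        · exact Or.inl ((PySem.Set.mem_add _ _ _).mpr (Or.inl hc))
        · rcases List.mem_cons.mp hx with rfl | hx'
          · exact Or.inl ((PySem.Set.mem_add _ _ _).mpr (Or.inr hv.symm))
          · exact Or.inr ⟨x, hx', hk, hv⟩
    · constructor
      · rintro (hc | ⟨x, hx, hk, hv⟩)
        · exact Or.inl hc
        · exact Or.inr ⟨x, List.mem_cons_of_mem _ hx, hk, hv⟩
      · rintro (hc | ⟨x, hx, hk, hv⟩)
        · exact Or.inl hc
        · rcases List.mem_cons.mp hx with rfl | hx'
          · exact absurd hk.symm h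
          · exact Or.inr ⟨x, hx', hk, hv⟩

lemma nodup_getD_foldl_modify_add {β : Type} (l : List β) (kf : β → List Char) (vf : β → Char)
    (d : PySem.Dict (List Char) (PySem.Set Char)) (h : ∀ k, (d.getD k []).Nodup) :
    ∀ k, ((l.foldl (fun d x => d.modify (kf x) [] (fun s => PySem.Set.add s (vf x))) d).getD k []).Nodup := by
  induction l generalizing d with
  | nil => exact h
  | cons a t ih =>
    rw [List.foldl_cons]
    refine ih _ (fun k => ?_)
    rw [PySem.Dict.getD_modify]
    split_ifs with hk
    · exact PySem.Set.nodup_add _ _ (h _)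
    · exact h _

-- 'word[len(word)-i:]' as a drop (i ≤ len(word))
lemma pvSliceFrom_eq (w : List Char) (i : Nat) (h : i ≤ w.length) :
    PySem.List.slice w (some ((w.length : Int) - (i : Int))) none = w.drop (w.length - i) := by
  rw [PySem.List.slice_from w (by omega : (0:Int) ≤ (w.length : Int) - (i : Int))]
  congr 1
  omega

-- characterization of the successor trie, with the start dictionary generalized
lemma mem_succAux (words : List (List Char)) :
    ∀ (d : PySem.Dict (List Char) (PySem.Set Char)) (p : List Char) (c : Char),
      (c ∈ (words.foldl (fun d w => (List.range w.length).foldl (fun d (i : Nat) =>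
          d.modify (PySem.List.slice w none (some (i : Int))) []
            (fun s => PySem.Set.add s (w.getD i ' '))) d) d).getD p []) ↔
        c ∈ d.getD p [] ∨ ∃ v ∈ words, ∃ j, j < v.length ∧ v.take j = p ∧ v.getD j ' ' = c := by
  induction words with
  | nil => simp
  | cons w t ih =>
    intro d p c
    rw [List.foldl_cons, ih, mem_getD_foldl_modify_add]
    simp only [PySem.List.slice_to_natCast, List.mem_range]
    constructor
    · rintro ((hc | ⟨i, hi, hk, hv⟩) | ⟨v, hv, hj⟩)
      · exact Or.inl hc
      · exact Or.inr ⟨w, List.mem_cons_self, i, hi, hk, hv⟩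
      · exact Or.inr ⟨v, List.mem_cons_of_mem _ hv, hj⟩
    · rintro (hc | ⟨v, hv, j, hj⟩)
      · exact Or.inl (Or.inl hc)
      · rcases List.mem_cons.mp hv with rfl | hv'
        · exact Or.inl (Or.inr ⟨j, hj.1, hj.2⟩)
        · exact Or.inr ⟨v, hv', j, hj⟩

lemma mem_succTrie (words : List (List Char)) (p : List Char) (c : Char) :
    (c ∈ (pvSuccTrie words).getD p []) ↔
      ∃ v ∈ words, ∃ j, j < v.length ∧ v.take j = p ∧ v.getD j ' ' = c := by
  unfold pvSuccTrie
  rw [mem_succAux]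
  simp [PySem.Dict.getD_empty]

lemma nodup_succTrie (words : List (List Char)) (p : List Char) :
    ((pvSuccTrie words).getD p []).Nodup := by
  unfold pvSuccTrie
  suffices H : ∀ (d : PySem.Dict (List Char) (PySem.Set Char)), (∀ k, (d.getD k []).Nodup) →
      ∀ k, ((words.foldl (fun d w => (List.range w.length).foldl (fun d (i : Nat) =>
          d.modify (PySem.List.slice w none (some (i : Int))) []
            (fun s => PySem.Set.add s (w.getD i ' '))) d) d).getD k []).Nodup by
    exact H _ (fun k => by simp [PySem.Dict.getD_empty]) p
  induction words with
  | nil => exact fun d h => h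
  | cons w t ih =>
    intro d h
    rw [List.foldl_cons]
    exact ih _ (nodup_getD_foldl_modify_add _ _ _ _ h)

-- characterization of the predecessor trie, with the start dictionary generalized
lemma mem_predAux (words : List (List Char)) :
    ∀ (d : PySem.Dict (List Char) (PySem.Set Char)) (p : List Char) (c : Char),
      (c ∈ (words.foldl (fun d w => (List.range w.length).foldl (fun d (i : Nat) =>
          d.modify (PySem.List.slice w (some ((w.length : Int) - (i : Int))) none) []
            (fun s => PySem.Set.add s (w.getD (w.length - i - 1) ' '))) d) d).getD p []) ↔
        c ∈ d.getD p [] ∨ ∃ v ∈ words, ∃ j, j < v.length ∧ v.drop (v.length - j) = p ∧ v.getD (v.length - j - 1) ' ' = c := by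
  induction words with
  | nil => simp
  | cons w t ih =>
    intro d p c
    rw [List.foldl_cons, ih, mem_getD_foldl_modify_add]
    simp only [List.mem_range]
    constructor
    · rintro ((hc | ⟨i, hi, hk, hv⟩) | ⟨v, hv, hj⟩)
      · exact Or.inl hc
      · refine Or.inr ⟨w, List.mem_cons_self, i, hi, ?_, hv⟩
        rwa [pvSliceFrom_eq w i (by omega)] at hk
      · exact Or.inr ⟨v, List.mem_cons_of_mem _ hv, hj⟩
    · rintro (hc | ⟨v, hv, j, hj, hk, hval⟩)
      · exact Or.inl (Or.inl hc)
      · rcases List.mem_cons.mp hv with rfl | hv'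
        · refine Or.inl (Or.inr ⟨j, hj, ?_, hval⟩)
          rw [pvSliceFrom_eq v j (by omega)]
          exact hk
        · exact Or.inr ⟨v, hv', j, hj, hk, hval⟩

lemma mem_predTrie (words : List (List Char)) (p : List Char) (c : Char) :
    (c ∈ (pvPredTrie words).getD p []) ↔
      ∃ v ∈ words, ∃ j, j < v.length ∧ v.drop (v.length - j) = p ∧ v.getD (v.length - j - 1) ' ' = c := by
  unfold pvPredTrie
  rw [mem_predAux]
  simp [PySem.Dict.getD_empty]

lemma nodup_predTrie (words : List (List Char)) (p : List Char) :
    ((pvPredTrie words).getD p []).Nodup := by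
  unfold pvPredTrie
  suffices H : ∀ (d : PySem.Dict (List Char) (PySem.Set Char)), (∀ k, (d.getD k []).Nodup) →
      ∀ k, ((words.foldl (fun d w => (List.range w.length).foldl (fun d (i : Nat) =>
          d.modify (PySem.List.slice w (some ((w.length : Int) - (i : Int))) none) []
            (fun s => PySem.Set.add s (w.getD (w.length - i - 1) ' '))) d) d).getD k []).Nodup by
    exact H _ (fun k => by simp [PySem.Dict.getD_empty]) p
  induction words with
  | nil => exact fun d h => h
  | cons w t ih =>
    intro d h
    rw [List.foldl_cons]
    exact ih _ (nodup_getD_foldl_modify_add _ _ _ _ h)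

-- per-position agreement: successor variety
lemma lsvEntry_eq (words : List (List Char)) (w : List Char) (i : Nat) (hi : i < w.length) :
    pvLsvEntryA words w i = pvLsvEntryB (pvSuccTrie words) w i := by
  unfold pvLsvEntryA pvLsvEntryB
  simp only [PySem.List.slice_to_natCast]
  refine (List.Perm.length_eq ?_).symm
  rw [List.perm_ext_iff_of_nodup (nodup_succTrie _ _) (PySem.Set.nodup_ofList _)]
  intro c
  rw [mem_succTrie, PySem.Set.mem_ofList]
  have hplen : (w.take i).length = i := by simp [List.length_take]; omega
  simp only [List.mem_map, List.mem_filter, Bool.and_eq_true, decide_eq_true_eq,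
    PySem.Chars.startswith_iff]
  constructor
  · rintro ⟨v, hv, j, hj, hk, hval⟩
    have hji : j = i := by
      have := congrArg List.length hk
      simp only [List.length_take, hplen] at this
      omega
    subst hji
    exact ⟨v, ⟨hv, hj, hk ▸ List.take_prefix _ _⟩, hval⟩
  · rintro ⟨v, ⟨hv, hlen, hpre⟩, hval⟩
    refine ⟨v, hv, i, hlen, ?_, hval⟩
    have heq := List.prefix_iff_eq_take.mp hpre
    rw [hplen] at heq
    exact heq.symm

-- per-position agreement: predecessor variety
lemma lpvEntry_eq (words : List (List Char)) (w : List Char) (i : Nat) (hi : i < w.length) :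
    pvLpvEntryA words w i = pvLpvEntryB (pvPredTrie words) w i := by
  unfold pvLpvEntryA pvLpvEntryB
  rw [pvSliceFrom_eq w i (by omega)]
  refine (List.Perm.length_eq ?_).symm
  rw [List.perm_ext_iff_of_nodup (nodup_predTrie _ _) (PySem.Set.nodup_ofList _)]
  intro c
  rw [mem_predTrie, PySem.Set.mem_ofList]
  have hplen : (w.drop (w.length - i)).length = i := by simp [List.length_drop]; omega
  simp only [List.mem_map, List.mem_filter, Bool.and_eq_true, decide_eq_true_eq,
    PySem.Chars.endswith_iff]
  constructor
  · rintro ⟨v, hv, j, hj, hk, hval⟩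
    have hji : j = i := by
      have := congrArg List.length hk
      simp only [List.length_drop, hplen] at this
      omega
    subst hji
    exact ⟨v, ⟨hv, hj, hk ▸ List.drop_suffix _ _⟩, hval⟩
  · rintro ⟨v, ⟨hv, hlen, hsuf⟩, hval⟩
    refine ⟨v, hv, i, hlen, ?_, hval⟩
    have heq := List.suffix_iff_eq_drop.mp hsuf
    rw [hplen] at heq
    exact heq.symm

-- per-word agreement
lemma wordA_eq_wordB (words : List (List Char)) (w : List Char) :
    pvWordA words w = pvWordB (pvSuccTrie words) (pvPredTrie words) w := by
  unfold pvWordA pvWordB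
  rw [PySem.List.foldl_prod_mk (f := fun acc i => acc ++ [pvLsvEntryA words w i])
        (g := fun acc i => acc ++ [pvLpvEntryA words w i]),
      PySem.List.foldl_append_singleton_eq_map, PySem.List.foldl_append_singleton_eq_map]
  simp only [List.nil_append]
  have h1 : (List.range w.length).map (pvLsvEntryA words w)
      = (List.range w.length).map (pvLsvEntryB (pvSuccTrie words) w) :=
    List.map_congr_left (fun i hi => lsvEntry_eq words w i (List.mem_range.mp hi))
  have h2 : (List.range w.length).map (pvLpvEntryA words w)
      = (List.range w.length).map (pvLpvEntryB (pvPredTrie words) w) :=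
    List.map_congr_left (fun i hi => lpvEntry_eq words w i (List.mem_range.mp hi))
  rw [h1, h2]

-- ===== VERDICT (by name: the statement is the Claim_ definition above) =====
theorem stem_lexeme_lsv_spec : Claim_equal_stem_lexeme_lsv := by
  intro lexeme _
  unfold Spec_stem_lexeme_lsv stem_lexeme_lsv stem_lexeme_lsv_alt
  simp only [PySem.List.foldl_append_singleton_eq_map, List.nil_append]
  exact List.map_congr_left (fun w _ => wordA_eq_wordB (pvDecorate lexeme) w)
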